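-- pv_equiv track=rewrite | github.com/DinnuBunny/Visual-Code | Dinnu Python/convert_num_to_readable_format.py | next_three
-- ===== SOURCE A (Python) =====
-- def next_three(item):
--     seq = []
--     i = 0
--     while i < 3:
--         num = item[i]
--         s = []
--         for j in range(i+1,3):
--             if num == item[j]:
--                 s.append(1)
--             else:
--                 break
--         if len(s) == 0:
--             seq.append(num)
--             i += 1
--         elif len(s) == 1:
--             seq.append("double " + num)
--             i += 2
--         elif len(s) == 2:
--             seq.append("tripple " + num)
--             i += 3
--     return (seq)
-- ===== SOURCE B (Python) =====
-- def next_three(item):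
--     a, b, c = item[0], item[1], item[2]
--     if a == b == c:
--         return ["tripple " + a]
--     if a == b:
--         return ["double " + a, c]
--     if b == c:
--         return [a, "double " + b]
--     return [a, b, c]
-- ===== Notes on version B (the rewrite author's own statement) =====
-- stated objective: simpler
-- what changed: replaces A's index-advancing while loop with an inner run-collecting scan by binding the three elements once and returning via a direct four-way case analysis
import Mathlib
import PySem

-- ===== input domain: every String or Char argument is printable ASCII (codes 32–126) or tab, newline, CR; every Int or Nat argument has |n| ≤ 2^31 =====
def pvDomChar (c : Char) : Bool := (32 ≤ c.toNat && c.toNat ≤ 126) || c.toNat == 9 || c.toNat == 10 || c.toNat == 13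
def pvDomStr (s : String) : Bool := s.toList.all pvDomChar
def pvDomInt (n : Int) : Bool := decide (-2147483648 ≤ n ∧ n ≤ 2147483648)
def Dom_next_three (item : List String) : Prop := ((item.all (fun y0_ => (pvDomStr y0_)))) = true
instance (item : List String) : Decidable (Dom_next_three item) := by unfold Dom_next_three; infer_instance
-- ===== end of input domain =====

-- B replaces A's index-advancing while loop by a closed four-way case analysis; objective: simpler.

-- ===== PORT A =====
-- inner 'for j in range(i+1,3): if num == item[j]: s.append(1) else: break'
def next_three_s (item : List String) (num : String) : List Nat → List Nat
  | [] => []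
  | j :: rest => if num = item.getD j "" then 1 :: next_three_s item num rest else []

-- 'while i < 3' loop; fuel bounds the (at most 3) iterations, i advances by ≥ 1 each step
def next_three_loop (item : List String) : Nat → Nat → List String → List String
  | 0, _, seq => seq
  | fuel + 1, i, seq =>
    if i < 3 then
      let num := item.getD i ""
      let s := next_three_s item num (List.range' (i + 1) (3 - (i + 1)))
      if s.length = 0 then next_three_loop item fuel (i + 1) (seq ++ [num])
      else if s.length = 1 then next_three_loop item fuel (i + 2) (seq ++ ["double " ++ num])
      else next_three_loop item fuel (i + 3) (seq ++ ["tripple " ++ num])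
    else seq

def next_three (item : List String) : List String :=
  next_three_loop item 3 0 []

-- ===== PORT B =====
def next_three_alt (item : List String) : List String :=
  let a := item.getD 0 ""
  let b := item.getD 1 ""
  let c := item.getD 2 ""
  if a = b ∧ b = c then ["tripple " ++ a]
  else if a = b then ["double " ++ a, c]
  else if b = c then [a, "double " ++ b]
  else [a, b, c]

-- ===== PRECONDITION & SPEC =====
-- A indexes item[0..2] and raises IndexError on lists shorter than 3 (B raises identically there).
def Pre_next_three (item : List String) : Prop := 3 ≤ item.length
instance (item : List String) : Decidable (Pre_next_three item) := by unfold Pre_next_three; infer_instance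
def pvWitness_next_three : List String := ["x", "x", "y"]

def Spec_next_three (item : List String) (out : List String) : Prop := out = next_three_alt item
instance (item : List String) (out : List String) : Decidable (Spec_next_three item out) := by unfold Spec_next_three; infer_instance

-- ===== CLAIM (what is proved, stated in full; the proofs are below) =====
def Claim_equal_next_three : Prop := ∀ (item : List String), Dom_next_three item → Pre_next_three item → Spec_next_three item (next_three item)

-- ===== LEMMAS AND PROOFS =====

-- ===== VERDICT (by name: the statement is the Claim_ definition above) =====
theorem next_three_spec : Claim_equal_next_three := by
  intro item _ hpre
  unfold Spec_next_three
  match item, hpre with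
  | a :: b :: c :: rest, _ =>
    by_cases hab : a = b <;> by_cases hbc : b = c <;> by_cases hac : a = c <;>
      simp_all [next_three, next_three_loop, next_three_s, next_three_alt, List.range']
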